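-- pv_equiv track=rewrite | github.com/PavansaiBheemisetty/GitaGPT-Mentor | backend/app/rag/generator.py | _is_theme_mechanism_valid
-- ===== SOURCE A (Python) =====
-- def _is_theme_mechanism_valid(theme: str, mechanism: str) -> bool:
--     lowered = mechanism.lower()
--     if theme == "grief_loss":
--         grief_cause = any(
--             token in lowered
--             for token in ("death", "absence", "irreversible", "memory", "memories", "loss", "physically")
--         )
--         grief_effect = any(
--             token in lowered
--             for token in ("love", "waves", "grief", "carry", "integration", "healing", "transform")
--         )
--         return grief_cause and grief_effect
--     if theme == "emotional_low":
--         low_cause = any(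
--             token in lowered for token in ("attachment", "longing", "memory", "replay", "separation", "loss")
--         )
--         low_effect = any(
--             token in lowered for token in ("pain", "grief", "loop", "self", "healing", "identity")
--         )
--         return low_cause and low_effect
--     if theme == "emotional_high":
--         high_cause = any(
--             token in lowered for token in ("success", "praise", "ego", "validation", "outcome", "pride")
--         )
--         high_effect = any(
--             token in lowered for token in ("fear", "loss", "instability", "pressure", "balance", "identity")
--         )
--         return high_cause and high_effect
--     if theme == "performance_context":
--         perf_cause = any(
--             token in lowered for token in ("result", "exam", "career", "feedback", "preparation", "anxiety")
--         )
--         perf_effect = any(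
--             token in lowered for token in ("focus", "method", "learning", "discipline", "consistency")
--         )
--         return perf_cause and perf_effect
--     if theme == "anger":
--         anger_cause = any(token in lowered for token in ("attachment", "desire", "craving", "expectation"))
--         anger_effect = any(token in lowered for token in ("anger", "frustration", "rage", "react"))
--         clarity_loss = any(token in lowered for token in ("clarity", "confusion", "judgment", "impulse"))
--         return anger_cause and anger_effect and clarity_loss
--     if theme == "stress":
--         stress_inputs = any(
--             token in lowered for token in ("pressure", "uncertainty", "duality", "overload", "stress")
--         )
--         stress_regulation = any(
--             token in lowered for token in ("steady", "stability", "regulate", "ground", "focus", "judgment")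
--         )
--         return stress_inputs and stress_regulation
--     if theme == "peace":
--         peace_cause = any(token in lowered for token in ("desire", "craving", "ego", "comparison", "wanting"))
--         peace_effect = any(token in lowered for token in ("peace", "agitation", "quiet", "content", "restless"))
--         return peace_cause and peace_effect
--     if theme == "failure":
--         failure_cause = any(
--             token in lowered for token in ("result", "outcome", "rejection", "setback", "failure")
--         )
--         failure_effect = any(
--             token in lowered for token in ("identity", "self-doubt", "helpless", "withdrawal", "worth")
--         )
--         return failure_cause and failure_effect
--     if theme == "existential":
--         existential_cause = any(
--             token in lowered for token in ("meaning", "purpose", "empty", "hollow", "motivation")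
--         )
--         existential_effect = any(
--             token in lowered for token in ("mind", "direction", "fatigue", "paralysis", "agency")
--         )
--         return existential_cause and existential_effect
--     if theme == "focus":
--         focus_cause = any(
--             token in lowered for token in ("attention", "distraction", "wandering", "task-switch", "fragment")
--         )
--         focus_effect = any(
--             token in lowered for token in ("return", "discipline", "concentration", "control", "focus")
--         )
--         return focus_cause and focus_effect
--     return True
-- ===== SOURCE B (Python) =====
-- _FLAT = {
--     "grief_loss": (3, (('death', 1), ('absence', 1), ('irreversible', 1), ('memory', 1), ('memories', 1), ('loss', 1), ('physically', 1), ('love', 2), ('waves', 2), ('grief', 2), ('carry', 2), ('integration', 2), ('healing', 2), ('transform', 2))),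
--     "emotional_low": (3, (('attachment', 1), ('longing', 1), ('memory', 1), ('replay', 1), ('separation', 1), ('loss', 1), ('pain', 2), ('grief', 2), ('loop', 2), ('self', 2), ('healing', 2), ('identity', 2))),
--     "emotional_high": (3, (('success', 1), ('praise', 1), ('ego', 1), ('validation', 1), ('outcome', 1), ('pride', 1), ('fear', 2), ('loss', 2), ('instability', 2), ('pressure', 2), ('balance', 2), ('identity', 2))),
--     "performance_context": (3, (('result', 1), ('exam', 1), ('career', 1), ('feedback', 1), ('preparation', 1), ('anxiety', 1), ('focus', 2), ('method', 2), ('learning', 2), ('discipline', 2), ('consistency', 2))),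
--     "anger": (7, (('attachment', 1), ('desire', 1), ('craving', 1), ('expectation', 1), ('anger', 2), ('frustration', 2), ('rage', 2), ('react', 2), ('clarity', 4), ('confusion', 4), ('judgment', 4), ('impulse', 4))),
--     "stress": (3, (('pressure', 1), ('uncertainty', 1), ('duality', 1), ('overload', 1), ('stress', 1), ('steady', 2), ('stability', 2), ('regulate', 2), ('ground', 2), ('focus', 2), ('judgment', 2))),
--     "peace": (3, (('desire', 1), ('craving', 1), ('ego', 1), ('comparison', 1), ('wanting', 1), ('peace', 2), ('agitation', 2), ('quiet', 2), ('content', 2), ('restless', 2))),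
--     "failure": (3, (('result', 1), ('outcome', 1), ('rejection', 1), ('setback', 1), ('failure', 1), ('identity', 2), ('self-doubt', 2), ('helpless', 2), ('withdrawal', 2), ('worth', 2))),
--     "existential": (3, (('meaning', 1), ('purpose', 1), ('empty', 1), ('hollow', 1), ('motivation', 1), ('mind', 2), ('direction', 2), ('fatigue', 2), ('paralysis', 2), ('agency', 2))),
--     "focus": (3, (('attention', 1), ('distraction', 1), ('wandering', 1), ('task-switch', 1), ('fragment', 1), ('return', 2), ('discipline', 2), ('concentration', 2), ('control', 2), ('focus', 2))),
-- }
--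
--
-- def _is_theme_mechanism_valid(theme: str, mechanism: str) -> bool:
--     # One flat scan over (token, group-bit) pairs with a bitmask accumulator:
--     # a group's bit is set the first time one of its tokens occurs; valid iff
--     # every group bit gets set. Unknown themes need mask 0, hence True.
--     lowered = mechanism.lower()
--     needed, tokens = _FLAT.get(theme, (0, ()))
--     seen = 0
--     for token, bit in tokens:
--         if not (seen & bit) and token in lowered:
--             seen |= bit
--             if seen == needed:
--                 break
--     return seen == needed
-- ===== Notes on version B (the rewrite author's own statement) =====
-- stated objective: alternative
-- what changed: Replaces A's ten hard-coded if-branches of per-group any(...) checks by a single flat scan over (token, group-bit) pairs from a theme table, accumulating a bitmask of satisfied groups (with early exit) and comparing it to the theme's full mask; unknown themes need mask 0, hence True.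
import Mathlib
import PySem

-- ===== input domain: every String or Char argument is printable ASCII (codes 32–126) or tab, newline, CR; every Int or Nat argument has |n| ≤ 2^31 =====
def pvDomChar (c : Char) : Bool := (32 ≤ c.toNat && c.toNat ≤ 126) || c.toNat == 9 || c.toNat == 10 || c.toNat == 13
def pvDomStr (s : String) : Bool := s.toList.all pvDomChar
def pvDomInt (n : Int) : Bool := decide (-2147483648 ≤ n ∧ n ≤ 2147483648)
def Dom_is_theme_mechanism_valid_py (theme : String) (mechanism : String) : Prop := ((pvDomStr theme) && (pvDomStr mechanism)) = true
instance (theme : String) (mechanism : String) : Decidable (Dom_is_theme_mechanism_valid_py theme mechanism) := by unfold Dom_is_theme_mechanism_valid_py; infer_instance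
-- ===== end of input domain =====

-- B replaces A's ten-branch if-chain of per-group any(...) checks by one flat scan
-- over (token, group-bit) pairs accumulating a bitmask (alternative decomposition; same cost).

-- ===== PORT A =====
-- literal transliteration of A's if-chain; 'token in lowered' = PySem.Str.isIn
def is_theme_mechanism_valid_py (theme : String) (mechanism : String) : Bool :=
  let lowered := PySem.Str.lower mechanism
  if theme == "grief_loss" then
    let grief_cause := (["death", "absence", "irreversible", "memory", "memories", "loss", "physically"]).any (fun token => PySem.Str.isIn token lowered)
    let grief_effect := (["love", "waves", "grief", "carry", "integration", "healing", "transform"]).any (fun token => PySem.Str.isIn token lowered)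
    grief_cause && grief_effect
  else if theme == "emotional_low" then
    let low_cause := (["attachment", "longing", "memory", "replay", "separation", "loss"]).any (fun token => PySem.Str.isIn token lowered)
    let low_effect := (["pain", "grief", "loop", "self", "healing", "identity"]).any (fun token => PySem.Str.isIn token lowered)
    low_cause && low_effect
  else if theme == "emotional_high" then
    let high_cause := (["success", "praise", "ego", "validation", "outcome", "pride"]).any (fun token => PySem.Str.isIn token lowered)
    let high_effect := (["fear", "loss", "instability", "pressure", "balance", "identity"]).any (fun token => PySem.Str.isIn token lowered)
    high_cause && high_effect
  else if theme == "performance_context" then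
    let perf_cause := (["result", "exam", "career", "feedback", "preparation", "anxiety"]).any (fun token => PySem.Str.isIn token lowered)
    let perf_effect := (["focus", "method", "learning", "discipline", "consistency"]).any (fun token => PySem.Str.isIn token lowered)
    perf_cause && perf_effect
  else if theme == "anger" then
    let anger_cause := (["attachment", "desire", "craving", "expectation"]).any (fun token => PySem.Str.isIn token lowered)
    let anger_effect := (["anger", "frustration", "rage", "react"]).any (fun token => PySem.Str.isIn token lowered)
    let clarity_loss := (["clarity", "confusion", "judgment", "impulse"]).any (fun token => PySem.Str.isIn token lowered)
    anger_cause && anger_effect && clarity_loss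
  else if theme == "stress" then
    let stress_inputs := (["pressure", "uncertainty", "duality", "overload", "stress"]).any (fun token => PySem.Str.isIn token lowered)
    let stress_regulation := (["steady", "stability", "regulate", "ground", "focus", "judgment"]).any (fun token => PySem.Str.isIn token lowered)
    stress_inputs && stress_regulation
  else if theme == "peace" then
    let peace_cause := (["desire", "craving", "ego", "comparison", "wanting"]).any (fun token => PySem.Str.isIn token lowered)
    let peace_effect := (["peace", "agitation", "quiet", "content", "restless"]).any (fun token => PySem.Str.isIn token lowered)
    peace_cause && peace_effect
  else if theme == "failure" then
    let failure_cause := (["result", "outcome", "rejection", "setback", "failure"]).any (fun token => PySem.Str.isIn token lowered)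
    let failure_effect := (["identity", "self-doubt", "helpless", "withdrawal", "worth"]).any (fun token => PySem.Str.isIn token lowered)
    failure_cause && failure_effect
  else if theme == "existential" then
    let existential_cause := (["meaning", "purpose", "empty", "hollow", "motivation"]).any (fun token => PySem.Str.isIn token lowered)
    let existential_effect := (["mind", "direction", "fatigue", "paralysis", "agency"]).any (fun token => PySem.Str.isIn token lowered)
    existential_cause && existential_effect
  else if theme == "focus" then
    let focus_cause := (["attention", "distraction", "wandering", "task-switch", "fragment"]).any (fun token => PySem.Str.isIn token lowered)
    let focus_effect := (["return", "discipline", "concentration", "control", "focus"]).any (fun token => PySem.Str.isIn token lowered)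
    focus_cause && focus_effect
  else
    true


-- ===== PORT B =====
-- B's flat table: theme → (needed bitmask, list of (token, group-bit) pairs)
def pvFlatTable : PySem.Dict String (Nat × List (String × Nat)) :=
  PySem.Dict.mk [
    ("grief_loss", (3, [("death", 1), ("absence", 1), ("irreversible", 1), ("memory", 1), ("memories", 1), ("loss", 1), ("physically", 1), ("love", 2), ("waves", 2), ("grief", 2), ("carry", 2), ("integration", 2), ("healing", 2), ("transform", 2)])),
    ("emotional_low", (3, [("attachment", 1), ("longing", 1), ("memory", 1), ("replay", 1), ("separation", 1), ("loss", 1), ("pain", 2), ("grief", 2), ("loop", 2), ("self", 2), ("healing", 2), ("identity", 2)])),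
    ("emotional_high", (3, [("success", 1), ("praise", 1), ("ego", 1), ("validation", 1), ("outcome", 1), ("pride", 1), ("fear", 2), ("loss", 2), ("instability", 2), ("pressure", 2), ("balance", 2), ("identity", 2)])),
    ("performance_context", (3, [("result", 1), ("exam", 1), ("career", 1), ("feedback", 1), ("preparation", 1), ("anxiety", 1), ("focus", 2), ("method", 2), ("learning", 2), ("discipline", 2), ("consistency", 2)])),
    ("anger", (7, [("attachment", 1), ("desire", 1), ("craving", 1), ("expectation", 1), ("anger", 2), ("frustration", 2), ("rage", 2), ("react", 2), ("clarity", 4), ("confusion", 4), ("judgment", 4), ("impulse", 4)])),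
    ("stress", (3, [("pressure", 1), ("uncertainty", 1), ("duality", 1), ("overload", 1), ("stress", 1), ("steady", 2), ("stability", 2), ("regulate", 2), ("ground", 2), ("focus", 2), ("judgment", 2)])),
    ("peace", (3, [("desire", 1), ("craving", 1), ("ego", 1), ("comparison", 1), ("wanting", 1), ("peace", 2), ("agitation", 2), ("quiet", 2), ("content", 2), ("restless", 2)])),
    ("failure", (3, [("result", 1), ("outcome", 1), ("rejection", 1), ("setback", 1), ("failure", 1), ("identity", 2), ("self-doubt", 2), ("helpless", 2), ("withdrawal", 2), ("worth", 2)])),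
    ("existential", (3, [("meaning", 1), ("purpose", 1), ("empty", 1), ("hollow", 1), ("motivation", 1), ("mind", 2), ("direction", 2), ("fatigue", 2), ("paralysis", 2), ("agency", 2)])),
    ("focus", (3, [("attention", 1), ("distraction", 1), ("wandering", 1), ("task-switch", 1), ("fragment", 1), ("return", 2), ("discipline", 2), ("concentration", 2), ("control", 2), ("focus", 2)]))]


-- the for-loop of Source B: skip tokens of already-satisfied groups, OR in the bit on a hit,
-- break early once the mask is complete; finally compare mask with needed
def pvScanFlat (p : String → Bool) (needed : Nat) : List (String × Nat) → Nat → Bool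
  | [], seen => seen == needed
  | (tok, bit) :: rest, seen =>
    if (seen &&& bit == 0) && p tok then
      let seen' := seen ||| bit
      if seen' == needed then true else pvScanFlat p needed rest seen'
    else pvScanFlat p needed rest seen

def is_theme_mechanism_valid_py_alt (theme : String) (mechanism : String) : Bool :=
  let lowered := PySem.Str.lower mechanism
  let entry := pvFlatTable.getD theme (0, [])
  pvScanFlat (fun token => PySem.Str.isIn token lowered) entry.1 entry.2 0

-- ===== PRECONDITION & SPEC =====
def Spec_is_theme_mechanism_valid_py (theme : String) (mechanism : String) (out : Bool) : Prop := out = is_theme_mechanism_valid_py_alt theme mechanism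
instance (theme : String) (mechanism : String) (out : Bool) : Decidable (Spec_is_theme_mechanism_valid_py theme mechanism out) := by unfold Spec_is_theme_mechanism_valid_py; infer_instance

-- ===== CLAIM =====
def Claim_equal_is_theme_mechanism_valid_py : Prop := ∀ (theme : String) (mechanism : String), Dom_is_theme_mechanism_valid_py theme mechanism → Spec_is_theme_mechanism_valid_py theme mechanism (is_theme_mechanism_valid_py theme mechanism)

-- ===== LEMMAS AND PROOFS =====
-- scanning a run of tokens that all carry an already-satisfied bit changes nothing
lemma pvScan_skip (p : String → Bool) (needed bit : Nat) (toks : List String)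
    (rest : List (String × Nat)) (seen : Nat) (h : (seen &&& bit == 0) = false) :
    pvScanFlat p needed (toks.map (fun t => (t, bit)) ++ rest) seen = pvScanFlat p needed rest seen := by
  induction toks with
  | nil => rfl
  | cons t ts ih => simp [pvScanFlat, h, ih]

-- scanning one group's run of tokens: the bit is ORed in iff some token hits
lemma pvScan_group (p : String → Bool) (needed bit : Nat) (toks : List String)
    (rest : List (String × Nat)) (seen : Nat) (h : (seen &&& bit == 0) = true)
    (hb : ((seen ||| bit) &&& bit == 0) = false) :
    pvScanFlat p needed (toks.map (fun t => (t, bit)) ++ rest) seen =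
      (if toks.any p then
        (if (seen ||| bit) == needed then true else pvScanFlat p needed rest (seen ||| bit))
      else pvScanFlat p needed rest seen) := by
  induction toks with
  | nil => simp [List.any_nil]
  | cons t ts ih =>
    by_cases hp : p t
    · simp only [List.map_cons, List.cons_append, pvScanFlat, h, hp, Bool.and_true,
        List.any_cons, Bool.true_or, if_true]
      split
      · rfl
      · exact pvScan_skip p needed bit ts rest _ hb
    · simp only [List.map_cons, List.cons_append, pvScanFlat, hp, Bool.and_false,
        List.any_cons, Bool.false_or]
      exact ih

lemma pvLem_grief_loss (p : String → Bool) :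
  pvScanFlat p 3 [("death", 1), ("absence", 1), ("irreversible", 1), ("memory", 1), ("memories", 1), ("loss", 1), ("physically", 1), ("love", 2), ("waves", 2), ("grief", 2), ("carry", 2), ("integration", 2), ("healing", 2), ("transform", 2)] 0 = ((["death", "absence", "irreversible", "memory", "memories", "loss", "physically"].any p) && (["love", "waves", "grief", "carry", "integration", "healing", "transform"].any p)) := by
  rw [show ([("death", 1), ("absence", 1), ("irreversible", 1), ("memory", 1), ("memories", 1), ("loss", 1), ("physically", 1), ("love", 2), ("waves", 2), ("grief", 2), ("carry", 2), ("integration", 2), ("healing", 2), ("transform", 2)] : List (String × Nat)) = (["death", "absence", "irreversible", "memory", "memories", "loss", "physically"].map (fun t => (t, 1)) ++ (["love", "waves", "grief", "carry", "integration", "healing", "transform"].map (fun t => (t, 2)) ++ ([] : List (String × Nat)))) from rfl]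
  rw [pvScan_group p 3 1 ["death", "absence", "irreversible", "memory", "memories", "loss", "physically"] _ 0 rfl rfl]
  simp only [Nat.reduceOr]
  rw [pvScan_group p 3 2 ["love", "waves", "grief", "carry", "integration", "healing", "transform"] _ 1 rfl rfl, pvScan_group p 3 2 ["love", "waves", "grief", "carry", "integration", "healing", "transform"] _ 0 rfl rfl]
  simp only [Nat.reduceOr]
  cases hg0 : List.any ["death", "absence", "irreversible", "memory", "memories", "loss", "physically"] p <;>
    cases hg1 : List.any ["love", "waves", "grief", "carry", "integration", "healing", "transform"] p <;>
    simp [pvScanFlat]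

lemma pvLem_emotional_low (p : String → Bool) :
  pvScanFlat p 3 [("attachment", 1), ("longing", 1), ("memory", 1), ("replay", 1), ("separation", 1), ("loss", 1), ("pain", 2), ("grief", 2), ("loop", 2), ("self", 2), ("healing", 2), ("identity", 2)] 0 = ((["attachment", "longing", "memory", "replay", "separation", "loss"].any p) && (["pain", "grief", "loop", "self", "healing", "identity"].any p)) := by
  rw [show ([("attachment", 1), ("longing", 1), ("memory", 1), ("replay", 1), ("separation", 1), ("loss", 1), ("pain", 2), ("grief", 2), ("loop", 2), ("self", 2), ("healing", 2), ("identity", 2)] : List (String × Nat)) = (["attachment", "longing", "memory", "replay", "separation", "loss"].map (fun t => (t, 1)) ++ (["pain", "grief", "loop", "self", "healing", "identity"].map (fun t => (t, 2)) ++ ([] : List (String × Nat)))) from rfl]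
  rw [pvScan_group p 3 1 ["attachment", "longing", "memory", "replay", "separation", "loss"] _ 0 rfl rfl]
  simp only [Nat.reduceOr]
  rw [pvScan_group p 3 2 ["pain", "grief", "loop", "self", "healing", "identity"] _ 1 rfl rfl, pvScan_group p 3 2 ["pain", "grief", "loop", "self", "healing", "identity"] _ 0 rfl rfl]
  simp only [Nat.reduceOr]
  cases hg0 : List.any ["attachment", "longing", "memory", "replay", "separation", "loss"] p <;>
    cases hg1 : List.any ["pain", "grief", "loop", "self", "healing", "identity"] p <;>
    simp [pvScanFlat]

lemma pvLem_emotional_high (p : String → Bool) :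
  pvScanFlat p 3 [("success", 1), ("praise", 1), ("ego", 1), ("validation", 1), ("outcome", 1), ("pride", 1), ("fear", 2), ("loss", 2), ("instability", 2), ("pressure", 2), ("balance", 2), ("identity", 2)] 0 = ((["success", "praise", "ego", "validation", "outcome", "pride"].any p) && (["fear", "loss", "instability", "pressure", "balance", "identity"].any p)) := by
  rw [show ([("success", 1), ("praise", 1), ("ego", 1), ("validation", 1), ("outcome", 1), ("pride", 1), ("fear", 2), ("loss", 2), ("instability", 2), ("pressure", 2), ("balance", 2), ("identity", 2)] : List (String × Nat)) = (["success", "praise", "ego", "validation", "outcome", "pride"].map (fun t => (t, 1)) ++ (["fear", "loss", "instability", "pressure", "balance", "identity"].map (fun t => (t, 2)) ++ ([] : List (String × Nat)))) from rfl]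
  rw [pvScan_group p 3 1 ["success", "praise", "ego", "validation", "outcome", "pride"] _ 0 rfl rfl]
  simp only [Nat.reduceOr]
  rw [pvScan_group p 3 2 ["fear", "loss", "instability", "pressure", "balance", "identity"] _ 1 rfl rfl, pvScan_group p 3 2 ["fear", "loss", "instability", "pressure", "balance", "identity"] _ 0 rfl rfl]
  simp only [Nat.reduceOr]
  cases hg0 : List.any ["success", "praise", "ego", "validation", "outcome", "pride"] p <;>
    cases hg1 : List.any ["fear", "loss", "instability", "pressure", "balance", "identity"] p <;>
    simp [pvScanFlat]

lemma pvLem_performance_context (p : String → Bool) :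
  pvScanFlat p 3 [("result", 1), ("exam", 1), ("career", 1), ("feedback", 1), ("preparation", 1), ("anxiety", 1), ("focus", 2), ("method", 2), ("learning", 2), ("discipline", 2), ("consistency", 2)] 0 = ((["result", "exam", "career", "feedback", "preparation", "anxiety"].any p) && (["focus", "method", "learning", "discipline", "consistency"].any p)) := by
  rw [show ([("result", 1), ("exam", 1), ("career", 1), ("feedback", 1), ("preparation", 1), ("anxiety", 1), ("focus", 2), ("method", 2), ("learning", 2), ("discipline", 2), ("consistency", 2)] : List (String × Nat)) = (["result", "exam", "career", "feedback", "preparation", "anxiety"].map (fun t => (t, 1)) ++ (["focus", "method", "learning", "discipline", "consistency"].map (fun t => (t, 2)) ++ ([] : List (String × Nat)))) from rfl]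
  rw [pvScan_group p 3 1 ["result", "exam", "career", "feedback", "preparation", "anxiety"] _ 0 rfl rfl]
  simp only [Nat.reduceOr]
  rw [pvScan_group p 3 2 ["focus", "method", "learning", "discipline", "consistency"] _ 1 rfl rfl, pvScan_group p 3 2 ["focus", "method", "learning", "discipline", "consistency"] _ 0 rfl rfl]
  simp only [Nat.reduceOr]
  cases hg0 : List.any ["result", "exam", "career", "feedback", "preparation", "anxiety"] p <;>
    cases hg1 : List.any ["focus", "method", "learning", "discipline", "consistency"] p <;>
    simp [pvScanFlat]

lemma pvLem_anger (p : String → Bool) :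
  pvScanFlat p 7 [("attachment", 1), ("desire", 1), ("craving", 1), ("expectation", 1), ("anger", 2), ("frustration", 2), ("rage", 2), ("react", 2), ("clarity", 4), ("confusion", 4), ("judgment", 4), ("impulse", 4)] 0 = ((["attachment", "desire", "craving", "expectation"].any p) && (["anger", "frustration", "rage", "react"].any p) && (["clarity", "confusion", "judgment", "impulse"].any p)) := by
  rw [show ([("attachment", 1), ("desire", 1), ("craving", 1), ("expectation", 1), ("anger", 2), ("frustration", 2), ("rage", 2), ("react", 2), ("clarity", 4), ("confusion", 4), ("judgment", 4), ("impulse", 4)] : List (String × Nat)) = (["attachment", "desire", "craving", "expectation"].map (fun t => (t, 1)) ++ (["anger", "frustration", "rage", "react"].map (fun t => (t, 2)) ++ (["clarity", "confusion", "judgment", "impulse"].map (fun t => (t, 4)) ++ ([] : List (String × Nat))))) from rfl]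
  rw [pvScan_group p 7 1 ["attachment", "desire", "craving", "expectation"] _ 0 rfl rfl]
  simp only [Nat.reduceOr]
  rw [pvScan_group p 7 2 ["anger", "frustration", "rage", "react"] _ 1 rfl rfl, pvScan_group p 7 2 ["anger", "frustration", "rage", "react"] _ 0 rfl rfl]
  simp only [Nat.reduceOr]
  rw [pvScan_group p 7 4 ["clarity", "confusion", "judgment", "impulse"] _ 3 rfl rfl, pvScan_group p 7 4 ["clarity", "confusion", "judgment", "impulse"] _ 2 rfl rfl, pvScan_group p 7 4 ["clarity", "confusion", "judgment", "impulse"] _ 1 rfl rfl, pvScan_group p 7 4 ["clarity", "confusion", "judgment", "impulse"] _ 0 rfl rfl]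
  simp only [Nat.reduceOr]
  cases hg0 : List.any ["attachment", "desire", "craving", "expectation"] p <;>
    cases hg1 : List.any ["anger", "frustration", "rage", "react"] p <;>
    cases hg2 : List.any ["clarity", "confusion", "judgment", "impulse"] p <;>
    simp [pvScanFlat]

lemma pvLem_stress (p : String → Bool) :
  pvScanFlat p 3 [("pressure", 1), ("uncertainty", 1), ("duality", 1), ("overload", 1), ("stress", 1), ("steady", 2), ("stability", 2), ("regulate", 2), ("ground", 2), ("focus", 2), ("judgment", 2)] 0 = ((["pressure", "uncertainty", "duality", "overload", "stress"].any p) && (["steady", "stability", "regulate", "ground", "focus", "judgment"].any p)) := by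
  rw [show ([("pressure", 1), ("uncertainty", 1), ("duality", 1), ("overload", 1), ("stress", 1), ("steady", 2), ("stability", 2), ("regulate", 2), ("ground", 2), ("focus", 2), ("judgment", 2)] : List (String × Nat)) = (["pressure", "uncertainty", "duality", "overload", "stress"].map (fun t => (t, 1)) ++ (["steady", "stability", "regulate", "ground", "focus", "judgment"].map (fun t => (t, 2)) ++ ([] : List (String × Nat)))) from rfl]
  rw [pvScan_group p 3 1 ["pressure", "uncertainty", "duality", "overload", "stress"] _ 0 rfl rfl]
  simp only [Nat.reduceOr]
  rw [pvScan_group p 3 2 ["steady", "stability", "regulate", "ground", "focus", "judgment"] _ 1 rfl rfl, pvScan_group p 3 2 ["steady", "stability", "regulate", "ground", "focus", "judgment"] _ 0 rfl rfl]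
  simp only [Nat.reduceOr]
  cases hg0 : List.any ["pressure", "uncertainty", "duality", "overload", "stress"] p <;>
    cases hg1 : List.any ["steady", "stability", "regulate", "ground", "focus", "judgment"] p <;>
    simp [pvScanFlat]

lemma pvLem_peace (p : String → Bool) :
  pvScanFlat p 3 [("desire", 1), ("craving", 1), ("ego", 1), ("comparison", 1), ("wanting", 1), ("peace", 2), ("agitation", 2), ("quiet", 2), ("content", 2), ("restless", 2)] 0 = ((["desire", "craving", "ego", "comparison", "wanting"].any p) && (["peace", "agitation", "quiet", "content", "restless"].any p)) := by
  rw [show ([("desire", 1), ("craving", 1), ("ego", 1), ("comparison", 1), ("wanting", 1), ("peace", 2), ("agitation", 2), ("quiet", 2), ("content", 2), ("restless", 2)] : List (String × Nat)) = (["desire", "craving", "ego", "comparison", "wanting"].map (fun t => (t, 1)) ++ (["peace", "agitation", "quiet", "content", "restless"].map (fun t => (t, 2)) ++ ([] : List (String × Nat)))) from rfl]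
  rw [pvScan_group p 3 1 ["desire", "craving", "ego", "comparison", "wanting"] _ 0 rfl rfl]
  simp only [Nat.reduceOr]
  rw [pvScan_group p 3 2 ["peace", "agitation", "quiet", "content", "restless"] _ 1 rfl rfl, pvScan_group p 3 2 ["peace", "agitation", "quiet", "content", "restless"] _ 0 rfl rfl]
  simp only [Nat.reduceOr]
  cases hg0 : List.any ["desire", "craving", "ego", "comparison", "wanting"] p <;>
    cases hg1 : List.any ["peace", "agitation", "quiet", "content", "restless"] p <;>
    simp [pvScanFlat]

lemma pvLem_failure (p : String → Bool) :
  pvScanFlat p 3 [("result", 1), ("outcome", 1), ("rejection", 1), ("setback", 1), ("failure", 1), ("identity", 2), ("self-doubt", 2), ("helpless", 2), ("withdrawal", 2), ("worth", 2)] 0 = ((["result", "outcome", "rejection", "setback", "failure"].any p) && (["identity", "self-doubt", "helpless", "withdrawal", "worth"].any p)) := by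
  rw [show ([("result", 1), ("outcome", 1), ("rejection", 1), ("setback", 1), ("failure", 1), ("identity", 2), ("self-doubt", 2), ("helpless", 2), ("withdrawal", 2), ("worth", 2)] : List (String × Nat)) = (["result", "outcome", "rejection", "setback", "failure"].map (fun t => (t, 1)) ++ (["identity", "self-doubt", "helpless", "withdrawal", "worth"].map (fun t => (t, 2)) ++ ([] : List (String × Nat)))) from rfl]
  rw [pvScan_group p 3 1 ["result", "outcome", "rejection", "setback", "failure"] _ 0 rfl rfl]
  simp only [Nat.reduceOr]
  rw [pvScan_group p 3 2 ["identity", "self-doubt", "helpless", "withdrawal", "worth"] _ 1 rfl rfl, pvScan_group p 3 2 ["identity", "self-doubt", "helpless", "withdrawal", "worth"] _ 0 rfl rfl]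
  simp only [Nat.reduceOr]
  cases hg0 : List.any ["result", "outcome", "rejection", "setback", "failure"] p <;>
    cases hg1 : List.any ["identity", "self-doubt", "helpless", "withdrawal", "worth"] p <;>
    simp [pvScanFlat]

lemma pvLem_existential (p : String → Bool) :
  pvScanFlat p 3 [("meaning", 1), ("purpose", 1), ("empty", 1), ("hollow", 1), ("motivation", 1), ("mind", 2), ("direction", 2), ("fatigue", 2), ("paralysis", 2), ("agency", 2)] 0 = ((["meaning", "purpose", "empty", "hollow", "motivation"].any p) && (["mind", "direction", "fatigue", "paralysis", "agency"].any p)) := by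
  rw [show ([("meaning", 1), ("purpose", 1), ("empty", 1), ("hollow", 1), ("motivation", 1), ("mind", 2), ("direction", 2), ("fatigue", 2), ("paralysis", 2), ("agency", 2)] : List (String × Nat)) = (["meaning", "purpose", "empty", "hollow", "motivation"].map (fun t => (t, 1)) ++ (["mind", "direction", "fatigue", "paralysis", "agency"].map (fun t => (t, 2)) ++ ([] : List (String × Nat)))) from rfl]
  rw [pvScan_group p 3 1 ["meaning", "purpose", "empty", "hollow", "motivation"] _ 0 rfl rfl]
  simp only [Nat.reduceOr]
  rw [pvScan_group p 3 2 ["mind", "direction", "fatigue", "paralysis", "agency"] _ 1 rfl rfl, pvScan_group p 3 2 ["mind", "direction", "fatigue", "paralysis", "agency"] _ 0 rfl rfl]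
  simp only [Nat.reduceOr]
  cases hg0 : List.any ["meaning", "purpose", "empty", "hollow", "motivation"] p <;>
    cases hg1 : List.any ["mind", "direction", "fatigue", "paralysis", "agency"] p <;>
    simp [pvScanFlat]

lemma pvLem_focus (p : String → Bool) :
  pvScanFlat p 3 [("attention", 1), ("distraction", 1), ("wandering", 1), ("task-switch", 1), ("fragment", 1), ("return", 2), ("discipline", 2), ("concentration", 2), ("control", 2), ("focus", 2)] 0 = ((["attention", "distraction", "wandering", "task-switch", "fragment"].any p) && (["return", "discipline", "concentration", "control", "focus"].any p)) := by
  rw [show ([("attention", 1), ("distraction", 1), ("wandering", 1), ("task-switch", 1), ("fragment", 1), ("return", 2), ("discipline", 2), ("concentration", 2), ("control", 2), ("focus", 2)] : List (String × Nat)) = (["attention", "distraction", "wandering", "task-switch", "fragment"].map (fun t => (t, 1)) ++ (["return", "discipline", "concentration", "control", "focus"].map (fun t => (t, 2)) ++ ([] : List (String × Nat)))) from rfl]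
  rw [pvScan_group p 3 1 ["attention", "distraction", "wandering", "task-switch", "fragment"] _ 0 rfl rfl]
  simp only [Nat.reduceOr]
  rw [pvScan_group p 3 2 ["return", "discipline", "concentration", "control", "focus"] _ 1 rfl rfl, pvScan_group p 3 2 ["return", "discipline", "concentration", "control", "focus"] _ 0 rfl rfl]
  simp only [Nat.reduceOr]
  cases hg0 : List.any ["attention", "distraction", "wandering", "task-switch", "fragment"] p <;>
    cases hg1 : List.any ["return", "discipline", "concentration", "control", "focus"] p <;>
    simp [pvScanFlat]


-- ===== VERDICT =====
theorem is_theme_mechanism_valid_py_spec : Claim_equal_is_theme_mechanism_valid_py := by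
  intro theme mechanism _
  unfold Spec_is_theme_mechanism_valid_py is_theme_mechanism_valid_py is_theme_mechanism_valid_py_alt pvFlatTable
  by_cases h1 : theme = "grief_loss" <;>
  by_cases h2 : theme = "emotional_low" <;>
  by_cases h3 : theme = "emotional_high" <;>
  by_cases h4 : theme = "performance_context" <;>
  by_cases h5 : theme = "anger" <;>
  by_cases h6 : theme = "stress" <;>
  by_cases h7 : theme = "peace" <;>
  by_cases h8 : theme = "failure" <;>
  by_cases h9 : theme = "existential" <;>
  by_cases h10 : theme = "focus" <;>
    simp_all [PySem.Dict.getD, PySem.Dict.get?, List.find?, beq_iff_eq,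
      pvLem_grief_loss, pvLem_emotional_low, pvLem_emotional_high, pvLem_performance_context,
      pvLem_anger, pvLem_stress, pvLem_peace, pvLem_failure, pvLem_existential, pvLem_focus] <;>
  simp [pvScanFlat,
      show ("grief_loss" == theme) = false by simpa using fun e => h1 e.symm,
      show ("emotional_low" == theme) = false by simpa using fun e => h2 e.symm,
      show ("emotional_high" == theme) = false by simpa using fun e => h3 e.symm,
      show ("performance_context" == theme) = false by simpa using fun e => h4 e.symm,
      show ("anger" == theme) = false by simpa using fun e => h5 e.symm,
      show ("stress" == theme) = false by simpa using fun e => h6 e.symm,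
      show ("peace" == theme) = false by simpa using fun e => h7 e.symm,
      show ("failure" == theme) = false by simpa using fun e => h8 e.symm,
      show ("existential" == theme) = false by simpa using fun e => h9 e.symm,
      show ("focus" == theme) = false by simpa using fun e => h10 e.symm]
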